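-- pv_equiv track=rewrite | github.com/shalinikannan23/leetcode-solutions | 2566-NumberOfUnequalTripletsInArray/2566-NumberOfUnequalTripletsInArray.py | unequalTriplets
-- ===== SOURCE A (Python) =====
-- def unequalTriplets(nums):
--     """
--     :type nums: List[int]
--     :rtype: int
--     """
--     count = 0
--     n = len(nums)
--
--     # Iterate over all possible triplets
--     for i in range(n):
--         for j in range(i + 1, n):
--             for k in range(j + 1, n):
--                 # Check if the triplet is pairwise distinct
--                 if nums[i] != nums[j] and nums[i] != nums[k] and nums[j] != nums[k]:
--                     count += 1
--
--     return count
-- ===== SOURCE B (Python) =====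
-- def unequalTriplets(nums):
--     # One pass, O(n): for each new element x, add the number of pairwise-distinct
--     # pairs already seen that also differ from x.
--     cnt = {}
--     m = 0        # elements seen so far
--     pairs = 0    # unequal pairs among them
--     total = 0    # pairwise-distinct triplets among them
--     for x in nums:
--         c = cnt.get(x, 0)
--         total += pairs - c * (m - c)
--         pairs += m - c
--         cnt[x] = c + 1
--         m += 1
--     return total
-- ===== Notes on version B (the rewrite author's own statement) =====
-- stated objective: faster
-- what changed: Replaced the O(n^3) triple loop with a single O(n) pass keeping a count dictionary, the running number of unequal pairs and the running triplet total, adding for each new element the unequal pairs that avoid its value.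
import Mathlib
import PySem

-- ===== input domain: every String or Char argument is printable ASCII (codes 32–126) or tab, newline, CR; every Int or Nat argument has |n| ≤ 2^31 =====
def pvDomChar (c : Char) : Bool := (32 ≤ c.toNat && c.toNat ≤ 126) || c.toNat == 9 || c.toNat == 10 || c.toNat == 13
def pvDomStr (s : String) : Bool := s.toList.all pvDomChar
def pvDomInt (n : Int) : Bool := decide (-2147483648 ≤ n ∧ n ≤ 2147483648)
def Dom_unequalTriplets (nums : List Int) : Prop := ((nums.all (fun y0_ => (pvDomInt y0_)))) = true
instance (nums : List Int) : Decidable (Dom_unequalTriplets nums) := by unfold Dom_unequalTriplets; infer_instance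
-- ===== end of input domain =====

-- B replaces A's O(n^3) triple loop by one O(n) pass with a count dictionary (objective: faster).

-- ===== PORT A =====
-- literal port of A's three nested index loops; nums[i] via pyGetD (the loop indices are always in range)
def unequalTriplets (nums : List Int) : Int :=
  let n : Int := nums.length
  (PySem.List.pyRange 0 n 1).foldl (fun count i =>
    (PySem.List.pyRange (i+1) n 1).foldl (fun count j =>
      (PySem.List.pyRange (j+1) n 1).foldl (fun count k =>
        if PySem.List.pyGetD nums i 0 ≠ PySem.List.pyGetD nums j 0 ∧
           PySem.List.pyGetD nums i 0 ≠ PySem.List.pyGetD nums k 0 ∧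
           PySem.List.pyGetD nums j 0 ≠ PySem.List.pyGetD nums k 0
        then count + 1 else count) count) count) 0

-- ===== PORT B =====
-- literal port of Source B: one fold over nums with state (cnt, m, pairs, total)
def unequalTriplets_alt (nums : List Int) : Int :=
  (nums.foldl
    (fun (st : PySem.Dict Int Int × Int × Int × Int) (x : Int) =>
      let cnt := st.1
      let m := st.2.1
      let pairs := st.2.2.1
      let total := st.2.2.2
      let c := PySem.Dict.getD cnt x 0
      (PySem.Dict.insert cnt x (c + 1), m + 1, pairs + (m - c), total + (pairs - c * (m - c))))
    (PySem.Dict.empty, 0, 0, 0)).2.2.2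

-- ===== PRECONDITION & SPEC =====
def Spec_unequalTriplets (nums : List Int) (out : Int) : Prop := out = unequalTriplets_alt nums
instance (nums : List Int) (out : Int) : Decidable (Spec_unequalTriplets nums out) := by unfold Spec_unequalTriplets; infer_instance

-- ===== CLAIM (what is proved, stated in full; the proofs are below) =====
def Claim_equal_unequalTriplets : Prop := ∀ (nums : List Int), Dom_unequalTriplets nums → Spec_unequalTriplets nums (unequalTriplets nums)

-- ===== LEMMAS AND PROOFS =====
-- Both ports are proved equal to 'trips', the number of pairwise-distinct index
-- triples i < j < k: port A by peeling the index ranges front-to-back (outer_eq),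
-- port B by a left-fold invariant over the processed prefix (portB_inv), using the
-- append recurrences pairsNe_append / trips_append.

def cntV (a : Int) (l : List Int) : Int := (l.countP (fun z => z == a) : Int)

theorem cnt_ne_len (x : Int) (l : List Int) :
    ((l.countP fun z => decide (x ≠ z)) : Int) = l.length - cntV x l := by
  induction l with
  | nil => simp [cntV]
  | cons h t ih =>
    by_cases hx : x = h
    · simp [cntV, hx] at *; omega
    · have hx' : ¬ h = x := fun e => hx e.symm
      simp [cntV, hx, hx'] at *; push_cast; omega

theorem cnt3_len (x a : Int) (l : List Int) (hxa : x ≠ a) :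
    ((l.countP fun z => decide (x ≠ z) && decide (a ≠ z)) : Int)
      = l.length - cntV x l - cntV a l := by
  induction l with
  | nil => simp [cntV]
  | cons h t ih =>
    by_cases hx : x = h <;> by_cases ha : a = h
    · exact absurd (hx.trans ha.symm) hxa
    · have ha' : ¬ h = a := fun e => ha e.symm
      simp [cntV, hx, ha', ha] at *
      omega
    · have hx' : ¬ h = x := fun e => hx e.symm
      simp [cntV, ha, hx', hx] at *
      omega
    · have hx' : ¬ h = x := fun e => hx e.symm
      have ha' : ¬ h = a := fun e => ha e.symm
      simp [cntV, hx, ha, hx', ha'] at *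
      push_cast
      omega

def pairsNe : List Int → Int
  | [] => 0
  | x :: xs => ((xs.countP fun z => decide (x ≠ z)) : Int) + pairsNe xs

def pfrom (x : Int) : List Int → Int
  | [] => 0
  | y :: ys => (if x ≠ y then ((ys.countP fun z => decide (x ≠ z) && decide (y ≠ z)) : Int) else 0) + pfrom x ys

def trips : List Int → Int
  | [] => 0
  | x :: xs => pfrom x xs + trips xs

theorem pairsNe_append (l : List Int) (a : Int) :
    pairsNe (l ++ [a]) = pairsNe l + (l.length - cntV a l) := by
  induction l with
  | nil => simp [pairsNe, cntV]
  | cons h t ih =>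
    by_cases hx : h = a
    · simp [pairsNe, List.countP_append, cntV, hx, ih] at *
      push_cast; omega
    · have hx' : ¬ a = h := fun e => hx e.symm
      simp [pairsNe, List.countP_append, cntV, hx, hx', ih] at *
      push_cast; omega

theorem pfrom_append (x : Int) (l : List Int) (a : Int) :
    pfrom x (l ++ [a]) = pfrom x l +
      (if x ≠ a then ((l.countP fun z => decide (x ≠ z) && decide (a ≠ z)) : Int) else 0) := by
  induction l with
  | nil => simp [pfrom]
  | cons y t ih =>
    simp only [List.cons_append, pfrom, List.countP_append, List.countP_cons, ih]
    by_cases h1 : x = y <;> by_cases h2 : x = a <;> by_cases h3 : y = a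
    · simp [h1, h2, h3]
    · exact absurd (h1.symm.trans h2) h3
    · exact absurd (h1.trans h3) h2
    · simp [h1, h2, h3, Ne.symm h3]
      try (push_cast; first | ring | omega)
    · exact absurd (h2.trans h3.symm) h1
    · simp [h1, h2, h3, Ne.symm h3]
      try (push_cast; first | ring | omega)
    · simp [h1, h2, h3]
      try (push_cast; first | ring | omega)
    · simp [h1, h2, h3, Ne.symm h3]
      try (push_cast; first | ring | omega)

theorem trips_append (l : List Int) (a : Int) :
    trips (l ++ [a]) = trips l + pairsNe l - cntV a l * (l.length - cntV a l) := by
  induction l with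
  | nil => simp [trips, pfrom, pairsNe, cntV]
  | cons x t ih =>
    simp only [List.cons_append, trips, pairsNe, pfrom_append, ih]
    by_cases hxa : x = a
    · subst hxa
      have h1 := cnt_ne_len x t
      simp [cntV, List.countP_cons] at *
      push_cast at *
      nlinarith [h1]
    · have hxa' : ¬ a = x := fun e => hxa e.symm
      have h2 := cnt3_len x a t hxa
      have h1 := cnt_ne_len x t
      simp [cntV, List.countP_cons, hxa, hxa'] at *
      push_cast at *
      nlinarith [h1, h2]

theorem inner_eq (xs : List Int) (x y : Int) :
    ∀ (k : Nat) (a acc : Int), 0 ≤ a → ((xs.length : Int) - a).toNat = k →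
    (PySem.List.pyRange a xs.length 1).foldl (fun c kk =>
        if x ≠ y ∧ x ≠ PySem.List.pyGetD xs kk 0 ∧ y ≠ PySem.List.pyGetD xs kk 0
        then c + 1 else c) acc
      = acc + (if x ≠ y then (((xs.drop a.toNat).countP fun z => decide (x ≠ z) && decide (y ≠ z)) : Int) else 0) := by
  intro k
  induction k with
  | zero =>
    intro a acc ha hk
    have hna : (xs.length : Int) ≤ a := by omega
    rw [PySem.List.pyRange_one_eq_nil hna]
    have hd : xs.drop a.toNat = [] := by
      apply List.drop_eq_nil_of_le; omega
    simp [hd]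
  | succ k ih =>
    intro a acc ha hk
    have hlt : a < (xs.length : Int) := by omega
    have hnat : a.toNat < xs.length := by omega
    rw [PySem.List.pyRange_one_cons hlt]
    rw [List.foldl_cons]
    rw [ih (a+1) _ (by omega) (by omega)]
    rw [List.drop_eq_getElem_cons hnat]
    have hget : PySem.List.pyGetD xs a 0 = xs[a.toNat] := PySem.List.pyGetD_eq_getElem xs 0 ha hlt
    have : (a+1).toNat = a.toNat + 1 := by omega
    rw [this, hget, List.countP_cons]
    by_cases h1 : x = y
    · simp [h1]
    · by_cases h2 : x = xs[a.toNat] <;> by_cases h3 : y = xs[a.toNat] <;>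
        simp [h1, h2, h3] <;> push_cast <;> ring

theorem mid_eq (xs : List Int) (x : Int) :
    ∀ (k : Nat) (a acc : Int), 0 ≤ a → ((xs.length : Int) - a).toNat = k →
    (PySem.List.pyRange a xs.length 1).foldl (fun c j =>
      (PySem.List.pyRange (j+1) xs.length 1).foldl (fun c kk =>
        if x ≠ PySem.List.pyGetD xs j 0 ∧ x ≠ PySem.List.pyGetD xs kk 0 ∧
           PySem.List.pyGetD xs j 0 ≠ PySem.List.pyGetD xs kk 0
        then c + 1 else c) c) acc
      = acc + pfrom x (xs.drop a.toNat) := by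
  intro k
  induction k with
  | zero =>
    intro a acc ha hk
    have hna : (xs.length : Int) ≤ a := by omega
    rw [PySem.List.pyRange_one_eq_nil hna]
    have hd : xs.drop a.toNat = [] := by
      apply List.drop_eq_nil_of_le; omega
    simp [hd, pfrom]
  | succ k ih =>
    intro a acc ha hk
    have hlt : a < (xs.length : Int) := by omega
    have hnat : a.toNat < xs.length := by omega
    rw [PySem.List.pyRange_one_cons hlt]
    rw [List.foldl_cons]
    rw [inner_eq xs x (PySem.List.pyGetD xs a 0) ((xs.length : Int) - (a+1)).toNat (a+1) acc (by omega) rfl]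
    rw [ih (a+1) _ (by omega) (by omega)]
    rw [List.drop_eq_getElem_cons hnat]
    have hget : PySem.List.pyGetD xs a 0 = xs[a.toNat] := PySem.List.pyGetD_eq_getElem xs 0 ha hlt
    have htn : (a+1).toNat = a.toNat + 1 := by omega
    rw [htn, hget]
    simp only [pfrom]
    ring

theorem outer_eq (xs : List Int) :
    ∀ (k : Nat) (a acc : Int), 0 ≤ a → ((xs.length : Int) - a).toNat = k →
    (PySem.List.pyRange a xs.length 1).foldl (fun c i =>
      (PySem.List.pyRange (i+1) xs.length 1).foldl (fun c j =>
        (PySem.List.pyRange (j+1) xs.length 1).foldl (fun c kk =>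
          if PySem.List.pyGetD xs i 0 ≠ PySem.List.pyGetD xs j 0 ∧
             PySem.List.pyGetD xs i 0 ≠ PySem.List.pyGetD xs kk 0 ∧
             PySem.List.pyGetD xs j 0 ≠ PySem.List.pyGetD xs kk 0
          then c + 1 else c) c) c) acc
      = acc + trips (xs.drop a.toNat) := by
  intro k
  induction k with
  | zero =>
    intro a acc ha hk
    have hna : (xs.length : Int) ≤ a := by omega
    rw [PySem.List.pyRange_one_eq_nil hna]
    have hd : xs.drop a.toNat = [] := by
      apply List.drop_eq_nil_of_le; omega
    simp [hd, trips]
  | succ k ih =>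
    intro a acc ha hk
    have hlt : a < (xs.length : Int) := by omega
    have hnat : a.toNat < xs.length := by omega
    rw [PySem.List.pyRange_one_cons hlt]
    rw [List.foldl_cons]
    rw [mid_eq xs (PySem.List.pyGetD xs a 0) ((xs.length : Int) - (a+1)).toNat (a+1) acc (by omega) rfl]
    rw [ih (a+1) _ (by omega) (by omega)]
    rw [List.drop_eq_getElem_cons hnat]
    have hget : PySem.List.pyGetD xs a 0 = xs[a.toNat] := PySem.List.pyGetD_eq_getElem xs 0 ha hlt
    have htn : (a+1).toNat = a.toNat + 1 := by omega
    rw [htn, hget]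
    simp only [trips]
    ring


theorem portA_eq_trips (nums : List Int) : unequalTriplets nums = trips nums := by
  unfold unequalTriplets
  rw [outer_eq nums ((nums.length : Int) - 0).toNat 0 0 (by omega) rfl]
  simp


theorem portB_inv (l : List Int) :
    ∀ (p : List Int) (cnt : PySem.Dict Int Int) (m pairs total : Int),
    (∀ y, PySem.Dict.getD cnt y 0 = cntV y p) → m = p.length → pairs = pairsNe p → total = trips p →
    (l.foldl
      (fun (st : PySem.Dict Int Int × Int × Int × Int) (x : Int) =>
        let cnt := st.1
        let m := st.2.1
        let pairs := st.2.2.1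
        let total := st.2.2.2
        let c := PySem.Dict.getD cnt x 0
        (PySem.Dict.insert cnt x (c + 1), m + 1, pairs + (m - c), total + (pairs - c * (m - c))))
      (cnt, m, pairs, total)).2.2.2 = trips (p ++ l) := by
  induction l with
  | nil => intro p cnt m pairs total hc hm hp ht; simpa using ht.symm ▸ rfl
  | cons x l ih =>
    intro p cnt m pairs total hc hm hp ht
    rw [List.foldl_cons]
    have hstep := ih (p ++ [x]) (PySem.Dict.insert cnt x (PySem.Dict.getD cnt x 0 + 1))
      (m + 1) (pairs + (m - PySem.Dict.getD cnt x 0)) (total + (pairs - PySem.Dict.getD cnt x 0 * (m - PySem.Dict.getD cnt x 0)))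
      ?_ ?_ ?_ ?_
    · simpa using hstep
    · intro y
      rw [PySem.Dict.getD_insert]
      by_cases hyx : y = x
      · subst hyx
        simp [cntV, List.countP_append, hc y]
      · simp [hc y, cntV, List.countP_append, fun e => hyx (e : y = x)]
        have : ¬ x = y := fun e => hyx e.symm
        simp [this]
    · simp [hm]
    · rw [pairsNe_append, hp, hm, hc x]
    · rw [trips_append, ht, hp, hm, hc x]
      ring

theorem portB_eq_trips (nums : List Int) : unequalTriplets_alt nums = trips nums := by
  unfold unequalTriplets_alt
  have := portB_inv nums [] PySem.Dict.empty 0 0 0 (fun y => by simp [cntV, PySem.Dict.getD, PySem.Dict.empty, PySem.Dict.get?]) (by simp) rfl rfl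
  simpa using this

-- ===== VERDICT (by name: the statement is the Claim_ definition above) =====
theorem unequalTriplets_spec : Claim_equal_unequalTriplets := by
  intro nums _
  unfold Spec_unequalTriplets
  rw [portA_eq_trips, portB_eq_trips]
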